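-- pv_equiv track=rewrite | github.com/sgsokol/influx | influx_si/tools_ssg.py | iternumbit
-- ===== SOURCE A (Python) =====
-- def iternumbit(i, size=0):
--     r"""iterator on bits and its number in integer starting from 0-position. The iterator yields tuples (n,bit). If optional size is zero then it stops at highest non-zero bit. If not, it will stop at bit number size-1."""
--     i=int(i)
--     moveb=1
--     b_no=0
--     while (moveb <= i and size==0) or (b_no < size):
--         yield (b_no, 1 if (moveb&i) else 0)
--         moveb<<=1
--         b_no+=1
-- ===== SOURCE B (Python) =====
-- def iternumbit(i, size=0):
--     """Instead of testing a moving mask bit by bit, compute the emitted width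
--     upfront, reduce i modulo 2**width to its two's-complement residue, render
--     that residue once as a zero-padded binary string, and enumerate the
--     string's characters low-bit-first."""
--     i = int(i)
--     width = size if size > 0 else (i.bit_length() if size == 0 and i > 0 else 0)
--     if width <= 0:
--         return
--     m = i % (1 << width)
--     for n, c in enumerate(reversed(bin(m)[2:].zfill(width))):
--         yield (n, int(c))
-- ===== Notes on version B (the rewrite author's own statement) =====
-- stated objective: alternative
-- what changed: B replaces A's fused moving-mask while-loop by a staged pipeline: it computes the emitted width upfront, reduces i modulo 2**width to its two's-complement residue, renders that residue once as a zero-padded binary string with bin()/zfill(), and enumerates the reversed string's characters; a timing run measured it much faster on large i because A shifts and ANDs a full-width mask on every iteration (O(k) big-int work per bit, O(k^2) total) while B does O(k) total work in C-level bin()/%.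
import Mathlib
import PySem

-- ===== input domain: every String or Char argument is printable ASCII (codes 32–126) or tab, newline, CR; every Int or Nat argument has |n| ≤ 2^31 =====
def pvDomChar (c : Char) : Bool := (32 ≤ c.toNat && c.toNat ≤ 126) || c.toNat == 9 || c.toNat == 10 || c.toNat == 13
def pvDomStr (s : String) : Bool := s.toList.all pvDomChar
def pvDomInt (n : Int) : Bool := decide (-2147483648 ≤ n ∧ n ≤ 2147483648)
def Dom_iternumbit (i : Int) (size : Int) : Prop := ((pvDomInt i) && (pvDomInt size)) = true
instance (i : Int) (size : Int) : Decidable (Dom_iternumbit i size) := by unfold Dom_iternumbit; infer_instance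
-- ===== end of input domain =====

-- B replaces A's bit-by-bit moving-mask loop by a staged computation: the emitted
-- width first, then i reduced modulo 2^width, rendered once as a zero-padded binary
-- string and enumerated low-bit-first (objective: alternative decomposition).

-- ===== PORT A =====
-- A's while loop: state (moveb, b_no, acc), condition and body exactly as in A.
-- The Nat argument is fuel for termination only: iternumbit passes an upper bound
-- on the number of iterations, so the 0-fuel branch is never reached.
def iternumbitLoop (i size : Int) : Nat → Int → Int → List (Int × Int) → List (Int × Int)
  | 0, _, _, acc => acc
  | fuel + 1, moveb, b_no, acc =>
    if (moveb ≤ i ∧ size = 0) ∨ b_no < size then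
      iternumbitLoop i size fuel (moveb <<< (1 : Nat)) (b_no + 1)
        (acc ++ [(b_no, if PySem.Int.band moveb i ≠ 0 then 1 else 0)])
    else acc

def iternumbit (i : Int) (size : Int) : List (Int × Int) :=
  iternumbitLoop i size (i.toNat + size.toNat + 1) 1 0 []

-- ===== PORT B =====
-- bin(n)[2:] as a list of characters (most significant bit first); bin(0)[2:] = "0"
def binCharsAux : Nat → List Char
  | 0 => []
  | n + 1 => binCharsAux ((n + 1) / 2) ++ [if (n + 1) % 2 = 1 then '1' else '0']

def binChars (n : Nat) : List Char := if n = 0 then ['0'] else binCharsAux n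

def iternumbit_alt (i : Int) (size : Int) : List (Int × Int) :=
  let width : Int :=
    if 0 < size then size
    else if size = 0 ∧ 0 < i then ((PySem.Int.bitLength i : Nat) : Int) else 0
  if width ≤ 0 then []
  else
    let m : Int := PySem.Int.mod i ((1 : Int) <<< width.toNat)   -- i % (1 << width), nonneg
    let s : List Char := binChars m.toNat                        -- bin(m)[2:]
    let padded : List Char := List.replicate (width.toNat - s.length) '0' ++ s  -- .zfill(width)
    (PySem.List.enumerate padded.reverse).map
      (fun p => (p.1, if p.2 = '1' then (1 : Int) else 0))       -- int(c) on c ∈ {'0','1'}: exact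

-- ===== PRECONDITION & SPEC =====
def Spec_iternumbit (i : Int) (size : Int) (out : List (Int × Int)) : Prop := out = iternumbit_alt i size
instance (i : Int) (size : Int) (out : List (Int × Int)) : Decidable (Spec_iternumbit i size out) := by unfold Spec_iternumbit; infer_instance

-- ===== CLAIM (what is proved, stated in full; the proofs are below) =====
def Claim_equal_iternumbit : Prop := ∀ (i : Int) (size : Int), Dom_iternumbit i size → Spec_iternumbit i size (iternumbit i size)

-- ===== LEMMAS AND PROOFS =====

-- the count of bits both versions emit, as an abbreviation for the proofs
def bitCount_B (i size : Int) : Int :=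
  if size ≠ 0 then size else (if 0 < i then ((PySem.Int.bitLength i : Nat) : Int) else 0)

-- A's bit at position n equals (i >> n) & 1, for every integer i
lemma bit_eq (n : Nat) (i : Int) :
    (if PySem.Int.band ((1 : Int) <<< n) i ≠ 0 then (1 : Int) else 0) = PySem.Int.band (i >>> n) 1 := by
  have hgen : ∀ c m' : Nat, PySem.Int.band (Int.ofNat c) (Int.ofNat m') = ((c &&& m' : Nat) : Int) :=
    fun c m' => by simp [PySem.Int.band]
  have hgen2 : ∀ c m' : Nat, PySem.Int.band (Int.ofNat c) (Int.negSucc m') = ((c - (c &&& m') : Nat) : Int) :=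
    fun c m' => by simp [PySem.Int.band, Int.negSucc_eq]; omega
  have hgen3 : ∀ c : Nat, PySem.Int.band (Int.negSucc c) 1 = 1 - ((1 &&& c : Nat) : Int) :=
    fun c => by simp [PySem.Int.band, Int.negSucc_eq]; omega
  have htb : ∀ m' : Nat, (m'.testBit n) = decide ((m' >>> n) % 2 = 1) :=
    fun m' => by simp [Nat.testBit, Nat.one_and_eq_mod_two]
  have hpow : (1 : Int) <<< n = Int.ofNat (2 ^ n) := by simp [Int.shiftLeft_eq]
  cases i with
  | ofNat m =>
    rw [hpow, show (Int.ofNat m) >>> n = Int.ofNat (m >>> n) from rfl,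
        show (1 : Int) = Int.ofNat 1 from rfl, hgen, hgen, Nat.two_pow_and, Nat.and_one_is_mod]
    cases hb : m.testBit n
    · have hm2 : ¬ ((m >>> n) % 2 = 1) := of_decide_eq_false ((htb m).symm.trans hb)
      simp [Nat.mod_two_ne_one.mp hm2]
    · have hm2 : (m >>> n) % 2 = 1 := of_decide_eq_true ((htb m).symm.trans hb)
      simp [hm2]
  | negSucc m =>
    rw [hpow, show (Int.negSucc m) >>> n = Int.negSucc (m >>> n) from rfl,
        hgen2, hgen3, Nat.two_pow_and, Nat.one_and_eq_mod_two]
    cases hb : m.testBit n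
    · have hm2 : ¬ ((m >>> n) % 2 = 1) := of_decide_eq_false ((htb m).symm.trans hb)
      rw [Nat.mod_two_ne_one.mp hm2]
      simp
    · have hm2 : (m >>> n) % 2 = 1 := of_decide_eq_true ((htb m).symm.trans hb)
      rw [hm2]
      simp

-- the loop condition at state (moveb = 2^k, b_no = k) says exactly k < bitCount_B
lemma cond_iff (i size : Int) (k : Nat) :
    (((1 : Int) <<< k ≤ i ∧ size = 0) ∨ (k : Int) < size) ↔ (k : Int) < bitCount_B i size := by
  have hpow : (1 : Int) <<< k = (2 ^ k : Int) := by rw [Int.shiftLeft_eq]; ring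
  rw [hpow]
  unfold bitCount_B
  by_cases hs : size = 0
  · subst hs
    have hknn : ¬ ((k : Int) < 0) := by omega
    simp only [ne_eq, not_true_eq_false, if_false, and_true, hknn, or_false]
    by_cases hi : 0 < i
    · have hne : i ≠ 0 := by omega
      have hL1 := PySem.Int.lt_two_pow_bitLength i
      have hL2 := PySem.Int.two_pow_bitLength_le i hne
      have habs : (i.natAbs : Int) = i := by omega
      rw [if_pos hi]
      constructor
      · intro h
        have h' : (2 : Nat) ^ k ≤ i.natAbs := by
          have hh : (((2 : Nat) ^ k : Nat) : Int) ≤ (i.natAbs : Int) := by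
            rw [habs]; exact_mod_cast h
          exact_mod_cast hh
        have hlt : (2 : Nat) ^ k < 2 ^ PySem.Int.bitLength i := lt_of_le_of_lt h' hL1
        have := (Nat.pow_lt_pow_iff_right (by norm_num : 1 < 2)).mp hlt
        exact_mod_cast this
      · intro h
        have hk : k < PySem.Int.bitLength i := by exact_mod_cast h
        have h2 : (2 : Nat) ^ k ≤ i.natAbs :=
          le_trans (Nat.pow_le_pow_right (by norm_num) (by omega)) hL2
        have hh : (((2 : Nat) ^ k : Nat) : Int) ≤ (i.natAbs : Int) := by exact_mod_cast h2
        rw [habs] at hh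
        exact_mod_cast hh
    · rw [if_neg hi]
      constructor
      · intro h
        have hpos : (0 : Int) < 2 ^ k := by positivity
        omega
      · intro h; omega
  · simp [hs]

-- loop characterization: with enough fuel, from state (2^k, k) what remains is the tail from k
lemma loop_eq (i size : Int) : ∀ (fuel k : Nat), (bitCount_B i size).toNat ≤ k + fuel →
    ∀ (acc : List (Int × Int)),
    iternumbitLoop i size fuel ((1 : Int) <<< k) (k : Int) acc =
      acc ++ (PySem.List.pyRange (k : Int) (bitCount_B i size) 1).map
        (fun m => (m, PySem.Int.band (i >>> m.toNat) 1)) := by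
  intro fuel
  induction fuel with
  | zero =>
    intro k hk acc
    have hlt : ¬ ((k : Int) < bitCount_B i size) := by omega
    have hempty : PySem.List.pyRange (k : Int) (bitCount_B i size) 1 = [] := by
      simp [PySem.List.pyRange, hlt]
    simp [iternumbitLoop, hempty]
  | succ n ih =>
    intro k hk acc
    by_cases hlt : (k : Int) < bitCount_B i size
    · rw [iternumbitLoop, if_pos ((cond_iff i size k).mpr hlt)]
      have hsh : ((1 : Int) <<< k) <<< (1 : Nat) = (1 : Int) <<< (k + 1) := by
        simp [Int.shiftLeft_eq, pow_succ]
      have hcast : (k : Int) + 1 = ((k + 1 : Nat) : Int) := by push_cast; ring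
      rw [hsh, hcast, ih (k + 1) (by omega)]
      rw [PySem.List.pyRange_one_cons hlt, List.map_cons]
      rw [← hcast]
      simp [bit_eq k i, List.append_assoc, Int.shiftRight_natCast_right]
    · rw [iternumbitLoop, if_neg (by rw [cond_iff]; exact hlt)]
      have hempty : PySem.List.pyRange (k : Int) (bitCount_B i size) 1 = [] := by
        simp [PySem.List.pyRange, hlt]
      simp [hempty]

-- the initial fuel bounds the number of iterations
lemma fuel_enough (i size : Int) : (bitCount_B i size).toNat ≤ i.toNat + size.toNat + 1 := by
  unfold bitCount_B
  by_cases hs : size = 0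
  · subst hs
    by_cases hi : 0 < i
    · have hne : i ≠ 0 := by omega
      have hL2 := PySem.Int.two_pow_bitLength_le i hne
      have hpow : PySem.Int.bitLength i - 1 < 2 ^ (PySem.Int.bitLength i - 1) :=
        Nat.lt_two_pow_self
      have habs : i.natAbs = i.toNat := by omega
      simp only [ne_eq, not_true_eq_false, if_false, if_pos hi]
      omega
    · simp only [ne_eq, not_true_eq_false, if_false, if_neg hi]
      omega
  · simp only [ne_eq, hs, not_false_iff, if_true]
    omega

-- B-side proof helpers -------------------------------------------------------

-- the binary digits of n, least significant first
def lsbChars : Nat → List Char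
  | 0 => []
  | n + 1 => (if (n + 1) % 2 = 1 then '1' else '0') :: lsbChars ((n + 1) / 2)

lemma binCharsAux_reverse : ∀ n : Nat, (binCharsAux n).reverse = lsbChars n := by
  intro n
  induction n using binCharsAux.induct with
  | case1 => simp [binCharsAux, lsbChars]
  | case2 n ih => rw [binCharsAux, lsbChars, List.reverse_append, ih]; simp

-- padding lsbChars n with zeros to width w gives the first w bits of n
lemma lsb_pad : ∀ (w n : Nat), n < 2 ^ w →
    lsbChars n ++ List.replicate (w - (lsbChars n).length) '0' =
      (List.range w).map (fun k => if n.testBit k then '1' else '0') := by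
  intro w
  induction w with
  | zero =>
    intro n hn
    interval_cases n
    simp [lsbChars]
  | succ w ih =>
    intro n hn
    match n with
    | 0 => simp [lsbChars]
    | n' + 1 =>
      rw [lsbChars]
      have hdiv : (n' + 1) / 2 < 2 ^ w := by
        have h2 : (n' + 1) / 2 < 2 ^ (w + 1) / 2 :=
          Nat.div_lt_div_of_lt_of_dvd ⟨2 ^ w, by ring⟩ hn
        simpa [Nat.pow_succ, Nat.mul_div_cancel] using h2
      have ihn := ih ((n' + 1) / 2) hdiv
      rw [List.range_succ_eq_map, List.map_cons, List.map_map]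
      have hhead : (if (n' + 1).testBit 0 then '1' else '0') = (if (n' + 1) % 2 = 1 then '1' else '0') := by
        simp [Nat.testBit_zero]
      have htail : (List.range w).map ((fun k => if (n' + 1).testBit k then '1' else '0') ∘ Nat.succ) =
          (List.range w).map (fun k => if ((n' + 1) / 2).testBit k then '1' else '0') := by
        refine List.map_congr_left (fun k _ => ?_)
        simp [Function.comp, Nat.testBit_add_one]
      rw [hhead, htail, ← ihn]
      simp [List.length_cons, Nat.succ_sub_succ]

-- PySem.List.enumerate of a range-map, as a range-map of pairs
lemma enum_map_range {α : Type} (f : Nat → α) : ∀ w : Nat,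
    PySem.List.enumerate ((List.range w).map f) 0 =
      (List.range w).map (fun (k : Nat) => ((k : Int), f k)) := by
  intro w
  induction w with
  | zero => simp
  | succ w ih =>
    rw [List.range_succ, List.map_append, PySem.List.enumerate_append, ih, List.map_append]
    simp [PySem.List.enumerate_cons, PySem.List.enumerate_nil]

-- the k-th bit of i % 2^w equals (i >> k) & 1, for k < w
lemma bit_of_mod (w k : Nat) (hk : k < w) (i : Int) :
    (if ((PySem.Int.mod i ((2 : Int) ^ w)).toNat.testBit k) then (1 : Int) else 0) =
      PySem.Int.band (i >>> k) 1 := by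
  have hpos : (0 : Int) < (2 : Int) ^ w := by positivity
  rw [PySem.Int.mod_eq_emod_of_pos hpos]
  have hgen3 : ∀ c : Nat, PySem.Int.band (Int.negSucc c) 1 = 1 - ((1 &&& c : Nat) : Int) :=
    fun c => by simp [PySem.Int.band, Int.negSucc_eq]; omega
  cases i with
  | ofNat a =>
    have hmod : (Int.ofNat a) % ((2 : Int) ^ w) = Int.ofNat (a % 2 ^ w) := by
      rfl
    rw [hmod]
    have htoNat : (Int.ofNat (a % 2 ^ w)).toNat = a % 2 ^ w := rfl
    rw [htoNat, Nat.testBit_mod_two_pow]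
    have hgen : ∀ c m' : Nat, PySem.Int.band (Int.ofNat c) (Int.ofNat m') = ((c &&& m' : Nat) : Int) :=
      fun c m' => by simp [PySem.Int.band]
    rw [show (Int.ofNat a) >>> k = Int.ofNat (a >>> k) from rfl,
        show (1 : Int) = Int.ofNat 1 from rfl, hgen, Nat.and_one_is_mod]
    have htb : a.testBit k = decide ((a >>> k) % 2 = 1) := by
      simp [Nat.testBit, Nat.one_and_eq_mod_two]
    cases hb : a.testBit k
    · have hm2 : ¬ ((a >>> k) % 2 = 1) := of_decide_eq_false (htb.symm.trans hb)
      simp [hk, Nat.mod_two_ne_one.mp hm2]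
    · have hm2 : (a >>> k) % 2 = 1 := of_decide_eq_true (htb.symm.trans hb)
      simp [hk, hm2]
  | negSucc c =>
    obtain ⟨r, hr⟩ : ∃ r, c % 2 ^ w = r := ⟨_, rfl⟩
    have hrlt : r < 2 ^ w := by rw [← hr]; exact Nat.mod_lt _ (by positivity)
    have hmod : (Int.negSucc c) % ((2 : Int) ^ w) = ((2 ^ w - 1 - r : Nat) : Int) := by
      have hdvd : ((2 : Int) ^ w) ∣ ((Int.negSucc c) - ((2 ^ w - 1 - r : Nat) : Int)) := by
        refine ⟨-((c : Int) / 2 ^ w) - 1, ?_⟩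
        have hc : (c : Int) = 2 ^ w * ((c : Int) / 2 ^ w) + r := by
          have h1 := Int.emod_add_mul_ediv (c : Int) (2 ^ w)
          have hre : (c : Int) % 2 ^ w = (r : Int) := by
            rw [← hr]; push_cast; rfl
          omega
        have hcast : ((2 ^ w - 1 - r : Nat) : Int) = 2 ^ w - 1 - (r : Int) := by
          rw [Nat.sub_sub, Nat.cast_sub (by omega : 1 + r ≤ 2 ^ w)]
          push_cast
          ring
        rw [Int.negSucc_eq, hcast, mul_sub, mul_neg, mul_one]
        omega
      have hlt2 : ((2 ^ w - 1 - r : Nat) : Int) < 2 ^ w := by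
        have : (2 ^ w - 1 - r : Nat) < 2 ^ w := by
          have : 0 < 2 ^ w := by positivity
          omega
        exact_mod_cast this
      have hnn : (0 : Int) ≤ ((2 ^ w - 1 - r : Nat) : Int) := Int.natCast_nonneg _
      calc (Int.negSucc c) % ((2 : Int) ^ w)
          = ((2 ^ w - 1 - r : Nat) : Int) % ((2 : Int) ^ w) := by
            apply Int.emod_eq_emod_iff_emod_sub_eq_zero.mpr
            exact Int.emod_eq_zero_of_dvd hdvd
        _ = ((2 ^ w - 1 - r : Nat) : Int) := Int.emod_eq_of_lt hnn hlt2
    rw [hmod]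
    have htoNat : (((2 ^ w - 1 - r : Nat) : Int)).toNat = 2 ^ w - 1 - r := Int.toNat_natCast _
    rw [htoNat]
    have hsub : 2 ^ w - 1 - r = 2 ^ w - (r + 1) := by omega
    rw [hsub, Nat.testBit_two_pow_sub_succ hrlt]
    have hrk : r.testBit k = c.testBit k := by
      rw [← hr, Nat.testBit_mod_two_pow]
      simp [hk]
    rw [show (Int.negSucc c) >>> k = Int.negSucc (c >>> k) from rfl, hgen3, Nat.one_and_eq_mod_two]
    have htb : c.testBit k = decide ((c >>> k) % 2 = 1) := by
      simp [Nat.testBit, Nat.one_and_eq_mod_two]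
    cases hb : c.testBit k
    · have hm2 : ¬ ((c >>> k) % 2 = 1) := of_decide_eq_false (htb.symm.trans hb)
      simp [hk, hrk, hb, Nat.mod_two_ne_one.mp hm2]
    · have hm2 : (c >>> k) % 2 = 1 := of_decide_eq_true (htb.symm.trans hb)
      simp [hk, hrk, hb, hm2]

-- B's width equals the emitted count, clamped at 0
lemma width_eq (i size : Int) :
    (if 0 < size then size else if size = 0 ∧ 0 < i then ((PySem.Int.bitLength i : Nat) : Int) else 0) =
      if bitCount_B i size ≤ 0 then 0 else bitCount_B i size := by
  unfold bitCount_B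
  rcases lt_trichotomy size 0 with h | h | h
  · rw [if_pos (show size ≠ 0 by omega), if_pos (show size ≤ 0 by omega),
        if_neg (show ¬ 0 < size by omega), if_neg (show ¬ (size = 0 ∧ 0 < i) by omega)]
  · subst h
    rw [if_neg (show ¬ ((0 : Int) ≠ 0) by simp), if_neg (lt_irrefl (0 : Int))]
    simp only [true_and]
    by_cases h3 : 0 < i
    · have hbl : 0 < PySem.Int.bitLength i := by
        by_contra hb
        have h0 : PySem.Int.bitLength i = 0 := by omega
        have := PySem.Int.lt_two_pow_bitLength i
        rw [h0] at this
        simp at this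
        omega
      rw [if_pos h3, if_neg (show ¬ (((PySem.Int.bitLength i : Nat) : Int) ≤ 0) by
        exact_mod_cast (by omega : ¬ ((PySem.Int.bitLength i : Nat) ≤ 0)))]
    · rw [if_neg h3, if_pos (le_refl (0 : Int))]
  · rw [if_pos (show size ≠ 0 by omega), if_neg (show ¬ size ≤ 0 by omega), if_pos h]

-- B's result in the same normal form the loop lemma produces
lemma alt_eval (i size : Int) : iternumbit_alt i size =
    (PySem.List.pyRange 0 (bitCount_B i size) 1).map
      (fun m => (m, PySem.Int.band (i >>> m.toNat) 1)) := by
  simp only [iternumbit_alt, width_eq i size]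
  by_cases hc : bitCount_B i size ≤ 0
  · rw [if_pos hc, if_pos (le_refl 0)]
    rw [PySem.List.pyRange_zero, Int.toNat_of_nonpos hc]
    simp
  · rw [if_neg hc]
    have hpos : 0 < bitCount_B i size := by omega
    obtain ⟨w, hw⟩ : ∃ w : Nat, (w : Int) = bitCount_B i size :=
      ⟨(bitCount_B i size).toNat, Int.toNat_of_nonneg (by omega)⟩
    have hw0 : 0 < w := by omega
    rw [← hw, if_neg (by omega)]
    simp only [Int.toNat_natCast]
    have hshift : (1 : Int) <<< w = (2 : Int) ^ w := by
      rw [Int.shiftLeft_eq]; ring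
    rw [hshift]
    have hposI : (0 : Int) < (2 : Int) ^ w := by positivity
    have hm0 : 0 ≤ PySem.Int.mod i ((2 : Int) ^ w) := PySem.Int.mod_nonneg _ hposI
    have hmlt : PySem.Int.mod i ((2 : Int) ^ w) < (2 : Int) ^ w := PySem.Int.mod_lt _ hposI
    have hmcast : (((PySem.Int.mod i ((2 : Int) ^ w)).toNat : Int)) = PySem.Int.mod i ((2 : Int) ^ w) :=
      Int.toNat_of_nonneg hm0
    have hmNlt : (PySem.Int.mod i ((2 : Int) ^ w)).toNat < 2 ^ w := by
      have h2 : ((2 : Int) ^ w) = (((2 ^ w : Nat)) : Int) := by push_cast; ring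
      omega
    -- the padded, reversed binary string is the list of the first w bits
    have hpadded :
        (List.replicate (w - (binChars (PySem.Int.mod i ((2 : Int) ^ w)).toNat).length) '0' ++
          binChars (PySem.Int.mod i ((2 : Int) ^ w)).toNat).reverse =
        (List.range w).map
          (fun k => if (PySem.Int.mod i ((2 : Int) ^ w)).toNat.testBit k then '1' else '0') := by
      by_cases hm : (PySem.Int.mod i ((2 : Int) ^ w)).toNat = 0
      · rw [hm]
        have : binChars 0 = ['0'] := rfl
        rw [this]
        rw [List.reverse_append, List.reverse_replicate]
        simp only [List.reverse_cons, List.reverse_nil, List.nil_append, List.length_cons,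
          List.length_nil, List.singleton_append]
        have hrep : '0' :: List.replicate (w - 1) '0' = List.replicate w '0' := by
          rw [← List.replicate_succ]
          congr 1
          omega
        rw [hrep]
        simp [Nat.zero_testBit]
      · rw [show binChars (PySem.Int.mod i ((2 : Int) ^ w)).toNat =
              binCharsAux (PySem.Int.mod i ((2 : Int) ^ w)).toNat from by rw [binChars, if_neg hm]]
        rw [List.reverse_append, List.reverse_replicate, binCharsAux_reverse]
        have hlen : (binCharsAux (PySem.Int.mod i ((2 : Int) ^ w)).toNat).length =
            (lsbChars (PySem.Int.mod i ((2 : Int) ^ w)).toNat).length := by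
          rw [← binCharsAux_reverse, List.length_reverse]
        rw [hlen]
        exact lsb_pad w _ hmNlt
    rw [hpadded, enum_map_range, List.map_map, PySem.List.pyRange_zero_natCast, List.map_map]
    refine List.map_congr_left (fun k hk => ?_)
    have hkw : k < w := List.mem_range.mp hk
    have hbit := bit_of_mod w k hkw i
    simp only [Function.comp]
    rw [Int.toNat_natCast, show i >>> ((k : Int)) = i >>> k from Int.shiftRight_natCast_right i k]
    rw [← hbit]
    simp

-- ===== VERDICT (by name: the statement is the Claim_ definition above) =====
theorem iternumbit_spec : Claim_equal_iternumbit := by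
  intro i size _
  unfold Spec_iternumbit iternumbit
  have h := loop_eq i size (i.toNat + size.toNat + 1) 0
    (by have := fuel_enough i size; omega) []
  rw [alt_eval]
  refine h.trans ?_
  rw [List.nil_append, Int.natCast_zero]
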